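-- pv_equiv track=rewrite | github.com/teqnodux/react_dashboard | backend/proxy_analysis_processor.py | _extract_section_summary
-- ===== SOURCE A (Python) =====
-- def _extract_section_summary(lines: list[str]) -> str:
--     """Extract the summary portion of a section, stopping at [SOURCE TEXT] marker."""
--     parts = []
--     for line in lines:
--         stripped = line.strip()
--         if stripped == "[SOURCE TEXT]":
--             break
--         if stripped:
--             parts.append(stripped)
--     return "\n".join(parts).strip()
-- ===== SOURCE B (Python) =====
-- def _extract_section_summary(lines: list[str]) -> str:
--     """Extract the summary portion of a section, stopping at [SOURCE TEXT] marker."""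
--     cut = next((i for i, l in enumerate(lines) if l.strip() == "[SOURCE TEXT]"), len(lines))
--     kept = [s for s in (l.strip() for l in lines[:cut]) if s]
--     return "\n".join(kept).strip()
-- ===== Notes on version B (the rewrite author's own statement) =====
-- stated objective: idiomatic
-- what changed: Replaces the fused break-loop-with-accumulator by two separate passes: first locate the marker index (defaulting to len(lines)), then strip/filter/join the prefix slice with comprehensions.
import Mathlib
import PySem

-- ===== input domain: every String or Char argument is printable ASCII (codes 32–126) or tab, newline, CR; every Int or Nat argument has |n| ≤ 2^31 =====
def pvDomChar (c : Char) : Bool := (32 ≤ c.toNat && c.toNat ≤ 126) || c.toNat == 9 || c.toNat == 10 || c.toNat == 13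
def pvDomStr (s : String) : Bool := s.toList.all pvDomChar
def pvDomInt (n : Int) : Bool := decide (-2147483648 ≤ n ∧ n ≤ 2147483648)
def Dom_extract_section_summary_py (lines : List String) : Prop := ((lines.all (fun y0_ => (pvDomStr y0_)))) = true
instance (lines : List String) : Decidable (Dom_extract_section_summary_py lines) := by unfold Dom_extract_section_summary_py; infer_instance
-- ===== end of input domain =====

-- B replaces A's fused break-loop by two passes (find the marker index, then strip/filter/join the prefix); idiomatic, same cost.

-- ===== PORT A =====
-- A's for-loop with break and accumulator, as structural recursion (break = stop collecting).
def pvALoop : List String → List String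
  | [] => []
  | l :: rest =>
    let stripped := PySem.Str.strip l
    if stripped = "[SOURCE TEXT]" then []
    else if stripped ≠ "" then stripped :: pvALoop rest
    else pvALoop rest

def extract_section_summary_py (lines : List String) : String :=
  PySem.Str.strip (PySem.Str.join "\n" (pvALoop lines))

-- ===== PORT B =====
def extract_section_summary_py_alt (lines : List String) : String :=
  let cut := lines.findIdx (fun l => PySem.Str.strip l == "[SOURCE TEXT]")
  let kept := ((lines.take cut).map PySem.Str.strip).filter (fun s => s ≠ "")
  PySem.Str.strip (PySem.Str.join "\n" kept)

-- ===== PRECONDITION & SPEC =====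
def Spec_extract_section_summary_py (lines : List String) (out : String) : Prop := out = extract_section_summary_py_alt lines
instance (lines : List String) (out : String) : Decidable (Spec_extract_section_summary_py lines out) := by unfold Spec_extract_section_summary_py; infer_instance

-- ===== CLAIM (what is proved, stated in full; the proofs are below) =====
def Claim_equal_extract_section_summary_py : Prop := ∀ (lines : List String), Dom_extract_section_summary_py lines → Spec_extract_section_summary_py lines (extract_section_summary_py lines)

-- ===== LEMMAS AND PROOFS =====

theorem pvALoop_eq (lines : List String) :
    pvALoop lines =
      ((lines.take (lines.findIdx (fun l => PySem.Str.strip l == "[SOURCE TEXT]"))).map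
        PySem.Str.strip).filter (fun s => s ≠ "") := by
  induction lines with
  | nil => rfl
  | cons l rest ih =>
    by_cases h : PySem.Str.strip l = "[SOURCE TEXT]"
    · simp [pvALoop, h, List.findIdx_cons]
    · have hb : (PySem.Str.strip l == "[SOURCE TEXT]") = false := by simp [h]
      by_cases h2 : PySem.Str.strip l = ""
      · simp [pvALoop, h, h2, List.findIdx_cons, hb, ih]
      · simp [pvALoop, h, h2, List.findIdx_cons, hb, ih]

-- ===== VERDICT (by name: the statement is the Claim_ definition above) =====
theorem extract_section_summary_py_spec : Claim_equal_extract_section_summary_py := by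
  intro lines _
  unfold Spec_extract_section_summary_py extract_section_summary_py extract_section_summary_py_alt
  rw [pvALoop_eq]
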